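-- pv_equiv track=rewrite | github.com/aja114/aoc | day22.py | get_unblocked_elements
-- ===== SOURCE A (Python) =====
-- import typing
--
-- Grid2D: typing.TypeAlias = list[list[str]]
--
-- def get_unblocked_elements(grid: Grid2D):
--     row_l = len(grid[0])
--     unblocked_elements = ["."] * row_l
--     for i in range(row_l):
--         j = 0
--         while grid[j][i] == ".":
--             j += 1
--             if j >= len(grid):
--                 break
--         else:
--             unblocked_elements[i] = grid[j][i]
--     return unblocked_elements
-- ===== SOURCE B (Python) =====
-- def get_unblocked_elements(grid):
--     row_l = len(grid[0])
--     result = ["."] * row_l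
--     unresolved = list(range(row_l))
--     for row in grid:
--         if not unresolved:
--             break
--         still = []
--         for i in unresolved:
--             c = row[i]
--             if c != ".":
--                 result[i] = c
--             else:
--                 still.append(i)
--         unresolved = still
--     return result
-- ===== Notes on version B (the rewrite author's own statement) =====
-- stated objective: alternative
-- what changed: Replaces A's per-column top-down while-scan (column-major, restarting j=0 for each column) by a single row-major pass that carries a worklist of still-unresolved columns, fills the first non-dot per column and stops early once every column is resolved.
-- outside the precondition, e.g. on get_unblocked_elements([['a', 'b'], ['x']]): A returns ['a', 'b'], B returns ['a', 'b']
import Mathlib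
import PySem

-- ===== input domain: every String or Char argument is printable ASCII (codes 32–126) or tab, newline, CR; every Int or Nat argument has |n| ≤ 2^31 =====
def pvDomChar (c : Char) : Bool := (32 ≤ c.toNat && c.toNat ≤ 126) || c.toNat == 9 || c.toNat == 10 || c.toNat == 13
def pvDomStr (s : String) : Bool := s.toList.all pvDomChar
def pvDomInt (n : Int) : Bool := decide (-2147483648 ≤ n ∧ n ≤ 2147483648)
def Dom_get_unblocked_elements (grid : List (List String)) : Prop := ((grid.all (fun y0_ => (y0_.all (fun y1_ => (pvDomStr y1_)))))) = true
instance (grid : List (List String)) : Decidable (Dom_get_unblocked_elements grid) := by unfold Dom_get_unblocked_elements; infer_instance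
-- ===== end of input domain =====

-- B replaces A's per-column top-down while-scan by one row-major pass over a worklist of
-- still-unresolved columns (alternative decomposition, same asymptotic cost).

-- ===== PORT A =====
-- the inner `while grid[j][i] == "."` loop of A; returns `some j` for the first non-dot row,
-- `none` if the `break` (j reached len(grid)) fired.  Out-of-range reads (excluded by Pre_)
-- are totalized with getD.
def pvWhileA (grid : List (List String)) (i : Nat) (j : Nat) : Option Nat :=
  if (grid.getD j []).getD i "" = "." then
    if j + 1 ≥ grid.length then none
    else pvWhileA grid i (j + 1)
  else some j
termination_by grid.length - j
decreasing_by omega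

def get_unblocked_elements (grid : List (List String)) : List String :=
  let row_l := (grid.headD []).length
  (List.range row_l).foldl
    (fun acc i =>
      match pvWhileA grid i 0 with
      | none => acc
      | some j => acc.set i ((grid.getD j []).getD i ""))
    (List.replicate row_l ".")

-- ===== PORT B =====
-- one unresolved column i against the current row: fill it if blocked, else keep it on the worklist
def pvStepB (row : List String) (acc : List String × List Nat) (i : Nat) : List String × List Nat :=
  let c := row.getD i ""
  if c ≠ "." then (acc.1.set i c, acc.2) else (acc.1, acc.2 ++ [i])

-- one row of B's pass (the inner `for i in unresolved` loop building `still`)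
def pvRowStepB (row : List String) (st : List String × List Nat) : List String × List Nat :=
  st.2.foldl (pvStepB row) (st.1, ([] : List Nat))

def pvLoopB : List (List String) → List String × List Nat → List String × List Nat
  | [], st => st
  | row :: rest, st => if st.2 = [] then st else pvLoopB rest (pvRowStepB row st)

def get_unblocked_elements_alt (grid : List (List String)) : List String :=
  let row_l := (grid.headD []).length
  (pvLoopB grid (List.replicate row_l ".", List.range row_l)).1

-- ===== PRECONDITION & SPEC =====
-- Python A raises IndexError on the empty grid (grid[0]) and can raise on ragged rows
-- shorter than the first row; Pre_ requires the grid non-empty with every row at least as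
-- long as the first.  This is slightly narrower than A's exact crash set: on a ragged grid
-- whose short rows are only reached after every column is blocked A still returns (and B
-- returns the same value); that shape-dependent safe set is excluded for being data-dependent.
def Pre_get_unblocked_elements (grid : List (List String)) : Prop :=
  grid ≠ [] ∧ ∀ row ∈ grid, (grid.headD []).length ≤ row.length
instance (grid : List (List String)) : Decidable (Pre_get_unblocked_elements grid) := by
  unfold Pre_get_unblocked_elements; infer_instance

def pvWitness_get_unblocked_elements : List (List String) :=
  [[".", "b", "."], ["a", ".", "."], [".", "c", "."]]

def Spec_get_unblocked_elements (grid : List (List String)) (out : List String) : Prop := out = get_unblocked_elements_alt grid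
instance (grid : List (List String)) (out : List String) : Decidable (Spec_get_unblocked_elements grid out) := by unfold Spec_get_unblocked_elements; infer_instance

-- ===== CLAIM (what is proved, stated in full; the proofs are below) =====
def Claim_equal_get_unblocked_elements : Prop := ∀ (grid : List (List String)), Dom_get_unblocked_elements grid → Pre_get_unblocked_elements grid → Spec_get_unblocked_elements grid (get_unblocked_elements grid)

-- ===== LEMMAS AND PROOFS =====

-- the value both programs put into column i, starting from default v
def pvColVal (rows : List (List String)) (i : Nat) (v : String) : String :=
  (((rows.find? (fun row => !(row.getD i "" == "."))).map (fun row => row.getD i "")).getD v)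

theorem pvColVal_nil (i : Nat) (v : String) : pvColVal [] i v = v := rfl

theorem pvColVal_cons (row : List String) (rest : List (List String)) (i : Nat) (v : String) :
    pvColVal (row :: rest) i v =
      if row.getD i "" = "." then pvColVal rest i v else row.getD i "" := by
  by_cases h : row.getD i "" = "."
  · rw [if_pos h]
    unfold pvColVal
    rw [List.find?_cons_of_neg (by rw [h]; simp)]
  · rw [if_neg h]
    unfold pvColVal
    rw [List.find?_cons_of_pos (by rw [beq_eq_false_iff_ne.mpr h]; rfl),
        Option.map_some, Option.getD_some]

-- ===== A side =====

theorem pvWhileA_val (n : Nat) : ∀ (grid : List (List String)) (i j : Nat) (d : String),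
    j < grid.length → grid.length - j ≤ n →
    (match pvWhileA grid i j with
     | none => d
     | some k => (grid.getD k []).getD i "") = pvColVal (grid.drop j) i d := by
  induction n with
  | zero => intro grid i j d hj hn; omega
  | succ n ih =>
    intro grid i j d hj hn
    have hdrop : grid.drop j = grid[j] :: grid.drop (j + 1) := List.drop_eq_getElem_cons hj
    have hgd : grid.getD j [] = grid[j] := List.getD_eq_getElem grid [] hj
    rw [pvWhileA, hdrop, pvColVal_cons]
    by_cases hc : (grid.getD j []).getD i "" = "."
    · rw [if_pos hc, if_pos (show grid[j].getD i "" = "." from hgd ▸ hc)]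
      by_cases hb : j + 1 ≥ grid.length
      · rw [if_pos hb, List.drop_eq_nil_of_le hb, pvColVal_nil]
      · rw [if_neg hb]
        exact ih grid i (j + 1) d (by omega) (by omega)
    · rw [if_neg hc, if_neg (show ¬grid[j].getD i "" = "." from hgd ▸ hc)]
      show (grid.getD j []).getD i "" = grid[j].getD i ""
      rw [hgd]

-- generic fold of A's shape: sets at indices < X.length leave an appended tail alone
theorem pvFoldA_append (h : Nat → Option String) :
    ∀ (l : List Nat) (X Y : List String), (∀ i ∈ l, i < X.length) →
    l.foldl (fun acc i => match h i with | none => acc | some v => acc.set i v) (X ++ Y)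
      = (l.foldl (fun acc i => match h i with | none => acc | some v => acc.set i v) X) ++ Y := by
  intro l
  induction l with
  | nil => intro X Y _; rfl
  | cons a t ih =>
    intro X Y hb
    simp only [List.foldl_cons]
    have ha : a < X.length := hb a (List.mem_cons_self ..)
    cases hx : h a with
    | none => exact ih X Y (fun i hi => hb i (List.mem_cons_of_mem _ hi))
    | some v =>
      simp only
      rw [List.set_append_left _ _ ha]
      exact ih (X.set a v) Y (fun i hi => by
        rw [List.length_set]; exact hb i (List.mem_cons_of_mem _ hi))

theorem pvFoldA_range (h : Nat → Option String) (d : String) :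
    ∀ n, (List.range n).foldl
        (fun acc i => match h i with | none => acc | some v => acc.set i v)
        (List.replicate n d)
      = (List.range n).map (fun i => (h i).getD d) := by
  intro n
  induction n with
  | zero => rfl
  | succ n ih =>
    rw [List.range_succ, List.foldl_append, List.map_append]
    have hrep : List.replicate (n + 1) d = List.replicate n d ++ [d] := by
      simp [List.replicate_succ']
    rw [hrep, pvFoldA_append h _ _ _ (by intro i hi; simpa [List.mem_range, List.length_replicate] using hi)]
    rw [ih]
    simp only [List.foldl_cons, List.foldl_nil, List.map_cons, List.map_nil]
    cases hx : h n with
    | none => simp [Option.getD]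
    | some v =>
      simp only [Option.getD_some]
      rw [List.set_append_right _ _ (by simp [List.length_map, List.length_range])]
      simp [List.length_map, List.length_range]

-- ===== B side =====

-- the plain "set all blocked columns" fold (fst of pvRowStepB)
def pvSetAll (row : List String) (res : List String) (l : List Nat) : List String :=
  l.foldl (fun r i => if row.getD i "" ≠ "." then r.set i (row.getD i "") else r) res

theorem pvFoldB_split (row : List String) :
    ∀ (l : List Nat) (res : List String) (acc2 : List Nat),
    l.foldl (pvStepB row) (res, acc2)
      = (pvSetAll row res l, acc2 ++ l.filter (fun i => row.getD i "" == ".")) := by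
  intro l
  induction l with
  | nil => intro res acc2; simp [pvSetAll]
  | cons a t ih =>
    intro res acc2
    rw [List.foldl_cons,
        show pvStepB row (res, acc2) a
          = if row.getD a "" ≠ "." then (res.set a (row.getD a ""), acc2) else (res, acc2 ++ [a]) from rfl]
    by_cases hc : row.getD a "" = "."
    · rw [if_neg (not_not_intro hc), ih,
          List.filter_cons_of_pos (by rw [hc]; rfl)]
      have hset : pvSetAll row res (a :: t) = pvSetAll row res t := by
        unfold pvSetAll; rw [List.foldl_cons, if_neg (not_not_intro hc)]
      rw [hset, List.append_assoc, List.singleton_append]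
    · have hf : List.filter (fun i => row.getD i "" == ".") (a :: t)
          = List.filter (fun i => row.getD i "" == ".") t :=
        List.filter_cons_of_neg (fun hteq => hc (eq_of_beq hteq))
      rw [if_pos hc, ih, hf]
      have hset : pvSetAll row res (a :: t) = pvSetAll row (res.set a (row.getD a "")) t := by
        unfold pvSetAll; rw [List.foldl_cons, if_pos hc]
      rw [hset]

theorem pvRowStepB_eq (row : List String) (res : List String) (unres : List Nat) :
    pvRowStepB row (res, unres)
      = (pvSetAll row res unres, unres.filter (fun i => row.getD i "" == ".")) := by
  show unres.foldl (pvStepB row) (res, []) = _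
  rw [pvFoldB_split, List.nil_append]

theorem pvSetAll_length (row : List String) :
    ∀ (l : List Nat) (res : List String), (pvSetAll row res l).length = res.length := by
  intro l
  induction l with
  | nil => intro res; rfl
  | cons a t ih =>
    intro res
    rw [show pvSetAll row res (a :: t)
          = pvSetAll row (if row.getD a "" ≠ "." then res.set a (row.getD a "") else res) t from by
        unfold pvSetAll; rw [List.foldl_cons], ih]
    by_cases hc : row.getD a "" = "."
    · rw [if_neg (not_not_intro hc)]
    · rw [if_pos hc, List.length_set]

theorem pvSetAll_getD (row : List String) :
    ∀ (l : List Nat) (res : List String) (i : Nat), (∀ k ∈ l, k < res.length) →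
    (pvSetAll row res l).getD i "" =
      if i ∈ l ∧ row.getD i "" ≠ "." then row.getD i "" else res.getD i "" := by
  intro l
  induction l with
  | nil => intro res i _; rw [if_neg (by simp)]; rfl
  | cons a t ih =>
    intro res i hb
    have ha : a < res.length := hb a (List.mem_cons_self ..)
    rw [show pvSetAll row res (a :: t)
          = pvSetAll row (if row.getD a "" ≠ "." then res.set a (row.getD a "") else res) t from by
        unfold pvSetAll; rw [List.foldl_cons]]
    by_cases hc : row.getD a "" = "."
    · rw [if_neg (not_not_intro hc),
          ih res i (fun k hk => hb k (List.mem_cons_of_mem _ hk))]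
      by_cases hit : i ∈ t ∧ row.getD i "" ≠ "."
      · rw [if_pos hit, if_pos ⟨List.mem_cons_of_mem _ hit.1, hit.2⟩]
      · rw [if_neg hit, if_neg ?_]
        rintro ⟨hm, hnd⟩
        rcases List.mem_cons.mp hm with h | h
        · exact hnd (h.symm ▸ hc)
        · exact hit ⟨h, hnd⟩
    · rw [if_pos hc,
          ih (res.set a (row.getD a "")) i
            (fun k hk => by rw [List.length_set]; exact hb k (List.mem_cons_of_mem _ hk))]
      by_cases hit : i ∈ t ∧ row.getD i "" ≠ "."
      · rw [if_pos hit, if_pos ⟨List.mem_cons_of_mem _ hit.1, hit.2⟩]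
      · rw [if_neg hit]
        by_cases hia : i = a
        · subst hia
          rw [if_pos ⟨List.mem_cons_self .., hc⟩,
              List.getD_eq_getElem _ _ (show i < (res.set i (row.getD i "")).length by
                rw [List.length_set]; exact ha)]
          exact List.getElem_set_self _
        · rw [if_neg (by
            rintro ⟨hm, hnd⟩
            rcases List.mem_cons.mp hm with h | h
            · exact hia h
            · exact hit ⟨h, hnd⟩)]
          rw [List.getD_eq_getElem?_getD, List.getElem?_set_ne (fun h => hia h.symm),
              ← List.getD_eq_getElem?_getD]

theorem pvLoopB_fst_length :
    ∀ (rows : List (List String)) (res : List String) (unres : List Nat),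
    (pvLoopB rows (res, unres)).1.length = res.length := by
  intro rows
  induction rows with
  | nil => intro res unres; rfl
  | cons row rest ih =>
    intro res unres
    rw [pvLoopB]
    by_cases hu : unres = []
    · rw [if_pos hu]
    · rw [if_neg hu, pvRowStepB_eq, ih, pvSetAll_length]

theorem pvLoopB_getD :
    ∀ (rows : List (List String)) (res : List String) (unres : List Nat) (i : Nat),
    (∀ k ∈ unres, k < res.length) →
    (pvLoopB rows (res, unres)).1.getD i "" =
      if i ∈ unres then pvColVal rows i (res.getD i "") else res.getD i "" := by
  intro rows
  induction rows with
  | nil =>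
    intro res unres i _
    simp only [pvLoopB, pvColVal_nil, ite_self]
  | cons row rest ih =>
    intro res unres i hb
    rw [pvLoopB]
    by_cases hu : unres = []
    · subst hu
      rw [if_pos rfl, if_neg (by simp)]
    · rw [if_neg hu, pvRowStepB_eq]
      have hb' : ∀ k ∈ unres.filter (fun i => row.getD i "" == "."),
          k < (pvSetAll row res unres).length := by
        intro k hk
        rw [pvSetAll_length]
        exact hb k (List.mem_of_mem_filter hk)
      rw [ih _ _ i hb', pvSetAll_getD row unres res i hb, pvColVal_cons]
      by_cases hm : i ∈ unres
      · by_cases hc : row.getD i "" = "."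
        · rw [if_pos (List.mem_filter.mpr ⟨hm, by rw [hc]; rfl⟩),
              if_neg (fun h => h.2 hc), if_pos hm, if_pos hc]
        · rw [if_neg (fun h => hc (by
                have := (List.mem_filter.mp h).2
                exact eq_of_beq this)),
              if_pos ⟨hm, hc⟩, if_pos hm, if_neg hc]
      · rw [if_neg (fun h => hm (List.mem_of_mem_filter h)),
            if_neg (fun h => hm h.1), if_neg hm]

-- ===== putting it together =====

theorem get_unblocked_elements_spec : Claim_equal_get_unblocked_elements := by
  intro grid _ hpre
  unfold Spec_get_unblocked_elements get_unblocked_elements get_unblocked_elements_alt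
  obtain ⟨hne, -⟩ := hpre
  have hlen : 0 < grid.length := List.length_pos_iff.mpr hne
  simp only
  set row_l := (grid.headD []).length with hrl
  -- A's fold is a map over range
  have hA :
      (List.range row_l).foldl
          (fun acc i =>
            match pvWhileA grid i 0 with
            | none => acc
            | some j => acc.set i ((grid.getD j []).getD i ""))
          (List.replicate row_l ".")
        = (List.range row_l).map (fun i => pvColVal grid i ".") := by
    have h1 := pvFoldA_range
      (fun i => (pvWhileA grid i 0).map (fun j => (grid.getD j []).getD i "")) "." row_l
    have hstep :
        (fun (acc : List String) (i : Nat) =>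
          match pvWhileA grid i 0 with
          | none => acc
          | some j => acc.set i ((grid.getD j []).getD i ""))
        = (fun (acc : List String) (i : Nat) =>
          match (pvWhileA grid i 0).map (fun j => (grid.getD j []).getD i "") with
          | none => acc
          | some v => acc.set i v) := by
      funext acc i
      cases pvWhileA grid i 0 <;> rfl
    rw [hstep, h1]
    apply List.map_congr_left
    intro i _
    have hv := pvWhileA_val grid.length grid i 0 "." hlen (by omega)
    rw [List.drop_zero] at hv
    rw [← hv]
    cases pvWhileA grid i 0 <;> rfl
  rw [hA]
  -- B's result, pointwise
  have hBlen : (pvLoopB grid (List.replicate row_l ".", List.range row_l)).1.length = row_l := by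
    rw [pvLoopB_fst_length, List.length_replicate]
  apply List.ext_getElem
  · rw [List.length_map, List.length_range, hBlen]
  · intro i h1 h2
    rw [← List.getD_eq_getElem _ "" h1, ← List.getD_eq_getElem _ "" h2]
    have hget := pvLoopB_getD grid (List.replicate row_l ".") (List.range row_l) i
      (by intro k hk; rw [List.length_replicate]; exact List.mem_range.mp hk)
    rw [hget]
    have hi : i < row_l := by rwa [List.length_map, List.length_range] at h1
    rw [if_pos (List.mem_range.mpr hi),
        List.getD_eq_getElem _ "" (show i < (List.replicate row_l ".").length by
          rwa [List.length_replicate]),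
        List.getElem_replicate,
        List.getD_eq_getElem _ "" h1]
    simp [List.getElem_map, List.getElem_range]
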